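-- pv_equiv track=rewrite | github.com/SubsolarGames/Cryptogram-Bot | codebusters/codebuster.py | disp_freq
-- ===== SOURCE A (Python) =====
-- def disp_freq(freq):
--     txt_dict = {}
--     counter = 0
--     for i in freq:
--         if freq[i] != 0:
--             spacing = ""
--             for j in range(3-len(str(freq[i]))):
--                 spacing += " "
--
--             if counter in txt_dict:
--                 txt_dict[counter] += f"    `**`{i.upper()}`**`: {freq[i]}" + spacing
--             else:
--                 txt_dict[counter] = f"`**`{i.upper()}`**`: {freq[i]}" + spacing
--
--             counter += 1
--
--             if counter == 5:
--                 counter = 0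
--
--     txt = ""
--     for i in txt_dict:
--         txt += txt_dict[i] + "\n"
--
--     return txt
-- ===== SOURCE B (Python) =====
-- def _chunks(cells):
--     """Split into consecutive rows of five, recursively."""
--     if not cells:
--         return []
--     return [cells[:5]] + _chunks(cells[5:])
--
--
-- def disp_freq(freq):
--     cells = [f"`**`{k.upper()}`**`: {v}" + " " * (3 - len(str(v)))
--              for k, v in freq.items() if v != 0]
--     rows = _chunks(cells)
--     out = ""
--     for r in range(min(len(cells), 5)):
--         out += "    ".join(row[r] for row in rows if r < len(row)) + "\n"
--     return out
-- ===== Notes on version B (the rewrite author's own statement) =====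
-- stated objective: alternative
-- what changed: A scatters each formatted cell round-robin into a counter-keyed dict of growing line strings in one stateful loop; B first formats the nonzero entries, then chunks them into consecutive rows of five with a recursive slicing helper, and builds each output line by transposing: gathering the r-th element of every row that has one and joining with four spaces.
import Mathlib
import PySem

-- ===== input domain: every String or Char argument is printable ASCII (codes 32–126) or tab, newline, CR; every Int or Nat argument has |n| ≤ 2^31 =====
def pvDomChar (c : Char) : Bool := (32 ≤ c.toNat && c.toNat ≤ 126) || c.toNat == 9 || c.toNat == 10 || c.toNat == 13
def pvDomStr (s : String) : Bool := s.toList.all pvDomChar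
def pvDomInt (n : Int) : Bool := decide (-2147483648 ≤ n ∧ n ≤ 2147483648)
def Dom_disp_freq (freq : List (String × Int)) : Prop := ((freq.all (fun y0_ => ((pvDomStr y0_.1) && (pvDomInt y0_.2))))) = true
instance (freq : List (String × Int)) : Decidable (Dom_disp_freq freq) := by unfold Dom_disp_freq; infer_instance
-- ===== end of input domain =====

-- B replaces A's stateful round-robin scatter (a counter-keyed dict of growing line
-- strings) by a two-stage transpose: format the nonzero cells, chunk them into
-- consecutive rows of five with a recursive helper, then build each output line by
-- gathering the r-th element of every row that has one (alternative decomposition).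

-- ===== PORT A =====
def disp_freq (freq : List (String × Int)) : String :=
  let d := PySem.Dict.ofList freq
  let st := d.keys.foldl (fun (s : PySem.Dict Int String × Int) i =>
      let v := d.getD i 0
      if v ≠ 0 then
        let spacing := (PySem.List.pyRange 0 (3 - PySem.Str.len (PySem.Int.toStr v)) 1).foldl
            (fun sp _ => sp ++ " ") ""
        let td := if s.1.contains s.2 then
            s.1.insert s.2 (s.1.getD s.2 "" ++ ("    `**`" ++ PySem.Str.upper i ++ "`**`: " ++ PySem.Int.toStr v) ++ spacing)
          else
            s.1.insert s.2 ("`**`" ++ PySem.Str.upper i ++ "`**`: " ++ PySem.Int.toStr v ++ spacing)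
        let c := s.2 + 1
        (td, if c == 5 then 0 else c)
      else s)
    (PySem.Dict.empty, (0 : Int))
  st.1.items.foldl (fun t kv => t ++ kv.2 ++ "\n") ""

-- ===== PORT B =====
def pvCell (k : String) (v : Int) : String :=
  "`**`" ++ PySem.Str.upper k ++ "`**`: " ++ PySem.Int.toStr v ++
    String.ofList (PySem.List.pyRepeat [' '] (3 - PySem.Str.len (PySem.Int.toStr v)))

-- Source B's _chunks: split into consecutive rows of five, recursively
def pvChunks (cells : List String) : List (List String) :=
  if h : cells = [] then []
  else PySem.List.slice cells none (some 5) :: pvChunks (PySem.List.slice cells (some 5) none)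
termination_by cells.length
decreasing_by
  have h5 : PySem.List.slice cells (some (5 : Int)) none = cells.drop 5 := by
    rw [PySem.List.slice_from cells (by norm_num)]; rfl
  rw [h5, List.length_drop]
  have : cells.length ≠ 0 := by simpa [List.length_eq_zero_iff] using h
  omega

def disp_freq_alt (freq : List (String × Int)) : String :=
  let d := PySem.Dict.ofList freq
  let cells := (d.items.filter (fun kv => kv.2 != 0)).map (fun kv => pvCell kv.1 kv.2)
  let rows := pvChunks cells
  (PySem.List.pyRange 0 (min ((cells.length : Int)) 5) 1).foldl
    (fun out r =>
      out ++ PySem.Str.join "    "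
        ((rows.filter (fun row => decide (r < ((row.length : Int))))).map
          (fun row => PySem.List.pyGetD row r "")) ++ "\n")
    ""

-- ===== PRECONDITION & SPEC =====
def Spec_disp_freq (freq : List (String × Int)) (out : String) : Prop := out = disp_freq_alt freq
instance (freq : List (String × Int)) (out : String) : Decidable (Spec_disp_freq freq out) := by unfold Spec_disp_freq; infer_instance

-- ===== CLAIM (what is proved, stated in full; the proofs are below) =====
def Claim_equal_disp_freq : Prop := ∀ (freq : List (String × Int)), Dom_disp_freq freq → Spec_disp_freq freq (disp_freq freq)

-- ===== LEMMAS AND PROOFS =====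

-- the mod-5 column of entries at positions ≡ r (mod 5), starting at index i
def bktA : List String → Nat → Nat → List String
  | [], _, _ => []
  | c :: t, i, r => (if i % 5 = r then [c] else []) ++ bktA t (i+1) r

-- A's loop step, after formatting has been factored out
def stepC (s : PySem.Dict Int String × Int) (c : String) : PySem.Dict Int String × Int :=
  (if s.1.contains s.2 then s.1.insert s.2 (s.1.getD s.2 "" ++ ("    " ++ c))
   else s.1.insert s.2 c,
   if s.2 + 1 == 5 then 0 else s.2 + 1)

theorem inter_nil_flat (L : List (List Char)) :
    (List.intersperse [] L).flatten = L.flatten := by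
  induction L with
  | nil => rfl
  | cons x t ih =>
    cases t with
    | nil => rfl
    | cons y u => simp [List.intersperse] at ih ⊢; simp_all

theorem join_cons_cons (sep x y : String) (t : List String) :
    PySem.Str.join sep (x :: y :: t) = x ++ sep ++ PySem.Str.join sep (y :: t) := by
  apply String.toList_injective
  simp [PySem.Str.toList_join, PySem.Chars.join_cons_cons]

theorem join_singleton (sep x : String) : PySem.Str.join sep [x] = x := by
  apply String.toList_injective
  simp [PySem.Str.join, PySem.Chars.join, List.intercalate]

theorem join_append_singleton (b : List String) (hb : b ≠ []) (c : String) :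
    PySem.Str.join "    " (b ++ [c]) = PySem.Str.join "    " b ++ "    " ++ c := by
  induction b with
  | nil => exact absurd rfl hb
  | cons x t ih =>
    cases t with
    | nil => simp [join_cons_cons, join_singleton]
    | cons y u =>
      have : x :: (y :: u ++ [c]) = x :: y :: (u ++ [c]) := rfl
      rw [List.cons_append, this, join_cons_cons]
      have h2 : y :: (u ++ [c]) = (y :: u) ++ [c] := rfl
      rw [h2, ih (by simp), join_cons_cons]
      simp [String.append_assoc]

theorem join_nil_cons (x : String) (t : List String) :
    PySem.Str.join "" (x :: t) = x ++ PySem.Str.join "" t := by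
  apply String.toList_injective
  simp [PySem.Str.join, PySem.Chars.join, List.intercalate, inter_nil_flat]

theorem bktA_append_singleton (cs : List String) (c : String) (i r : Nat) :
    bktA (cs ++ [c]) i r = bktA cs i r ++ (if (i + cs.length) % 5 = r then [c] else []) := by
  induction cs generalizing i with
  | nil => simp [bktA]
  | cons x t ih =>
    simp only [List.cons_append, bktA, ih (i + 1), List.length_cons, List.append_assoc]
    have : i + 1 + t.length = i + (t.length + 1) := by omega
    rw [this]
    rfl

theorem bktA_eq_nil (cs : List String) (i r : Nat)
    (h : ∀ j, j < cs.length → (i + j) % 5 ≠ r) : bktA cs i r = [] := by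
  induction cs generalizing i with
  | nil => rfl
  | cons x t ih =>
    simp only [bktA]
    rw [if_neg (by have := h 0 (by simp); simpa using this),
      ih (i + 1) (fun j hj => by have := h (j + 1) (by simpa using hj); omega)]
    rfl

theorem bktA_ne_nil (cs : List String) (i r : Nat)
    (h : ∃ j, j < cs.length ∧ (i + j) % 5 = r) : bktA cs i r ≠ [] := by
  induction cs generalizing i with
  | nil => obtain ⟨j, hj, _⟩ := h; simp at hj
  | cons x t ih =>
    obtain ⟨j, hj, hr⟩ := h
    simp only [bktA]
    by_cases h0 : i % 5 = r
    · simp [h0]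
    · have hj0 : j ≠ 0 := by rintro rfl; simp at hr; exact h0 hr
      rw [if_neg h0, List.nil_append]
      exact ih (i + 1) ⟨j - 1, by simp at hj; omega, by omega⟩

theorem coreA (cs : List String) :
    cs.foldl stepC (PySem.Dict.empty, (0 : Int)) =
      (PySem.Dict.mk ((List.range (min cs.length 5)).map
          (fun (r : Nat) => ((r : Int), PySem.Str.join "    " (bktA cs 0 r)))),
       ((cs.length % 5 : Nat) : Int)) := by
  induction cs using List.reverseRecOn with
  | nil => rfl
  | append_singleton cs c ih =>
    rw [List.foldl_append, List.foldl_cons, List.foldl_nil, ih]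
    set n := cs.length with hn
    have hlen : (cs ++ [c]).length = n + 1 := by simp [← hn]
    have hnodup : ((List.range (min n 5)).map
        (fun (r : Nat) => ((r : Int), PySem.Str.join "    " (bktA cs 0 r)))).map Prod.fst |>.Nodup := by
      simp only [List.map_map]
      exact (List.nodup_range).map (by intro a b hab; simpa using hab)
    by_cases hlt : n < 5
    · -- counter = n, fresh key
      have hm : min n 5 = n := by omega
      have hmod : n % 5 = n := Nat.mod_eq_of_lt hlt
      have hcont : (PySem.Dict.mk ((List.range (min n 5)).map
          (fun (r : Nat) => ((r : Int), PySem.Str.join "    " (bktA cs 0 r))))).contains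
            ((n % 5 : Nat) : Int) = false := by
        rw [PySem.Dict.contains_eq_decide_mem_keys]
        simp only [PySem.Dict.keys_mk, List.map_map, decide_eq_false_iff_not]
        intro hmem
        simp only [List.mem_map, List.mem_range, Function.comp] at hmem
        obtain ⟨r, hr, hcast⟩ := hmem
        have : r = n % 5 := by exact_mod_cast hcast
        omega
      simp only [stepC, hcont, Bool.false_eq_true, if_false]
      refine Prod.ext ?_ ?_
      · dsimp only
        apply PySem.Dict.ext
        rw [PySem.Dict.items_insert_of_not_contains _ _ hcont]
        have h1 : min (n + 1) 5 = n + 1 := by omega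
        show _ ++ _ = List.map _ (List.range (min ((cs ++ [c]).length) 5))
        rw [hlen, h1, hm, List.range_succ, List.map_append]
        congr 1
        · apply List.map_congr_left
          intro r hr
          simp only [List.mem_range] at hr
          congr 1
          rw [bktA_append_singleton]
          rw [if_neg (by omega)]
          simp
        · simp only [List.map_cons, List.map_nil]
          rw [hmod]
          congr 2
          rw [bktA_append_singleton, bktA_eq_nil cs 0 n (fun j hj => by omega),
            if_pos (by omega)]
          simp [join_singleton]
      · dsimp only
        rw [hlen, hmod]
        by_cases h4 : n = 4
        · rw [h4]; norm_num
        · rw [if_neg (by simp; omega)]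
          have : (n + 1) % 5 = n + 1 := Nat.mod_eq_of_lt (by omega)
          rw [this]
          push_cast; ring
    · -- counter = n % 5, existing key
      have hm : min n 5 = 5 := by omega
      have hm' : min (n + 1) 5 = 5 := by omega
      have h5 : n % 5 < 5 := Nat.mod_lt _ (by norm_num)
      have hmem : (((n % 5 : Nat) : Int), PySem.Str.join "    " (bktA cs 0 (n % 5))) ∈
          ((List.range (min n 5)).map
            (fun (r : Nat) => ((r : Int), PySem.Str.join "    " (bktA cs 0 r)))) := by
        rw [hm]
        exact List.mem_map.mpr ⟨n % 5, List.mem_range.mpr h5, rfl⟩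
      have hcont : (PySem.Dict.mk ((List.range (min n 5)).map
          (fun (r : Nat) => ((r : Int), PySem.Str.join "    " (bktA cs 0 r))))).contains
            ((n % 5 : Nat) : Int) = true := by
        rw [PySem.Dict.contains_eq_decide_mem_keys]
        simp only [PySem.Dict.keys_mk, decide_eq_true_eq]
        exact List.mem_map.mpr ⟨_, hmem, rfl⟩
      have hgetD : (PySem.Dict.mk ((List.range (min n 5)).map
          (fun (r : Nat) => ((r : Int), PySem.Str.join "    " (bktA cs 0 r))))).getD
            ((n % 5 : Nat) : Int) "" = PySem.Str.join "    " (bktA cs 0 (n % 5)) :=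
        PySem.Dict.getD_of_mem_items _ hmem (by simpa [PySem.Dict.keys_mk] using hnodup) ""
      simp only [stepC, hcont, if_true, hgetD]
      refine Prod.ext ?_ ?_
      · dsimp only
        apply PySem.Dict.ext
        rw [PySem.Dict.items_insert_of_contains _ _ hcont]
        show List.map _ _ = List.map _ (List.range (min ((cs ++ [c]).length) 5))
        rw [hlen, hm', hm, List.map_map]
        apply List.map_congr_left
        intro r hr
        simp only [List.mem_range] at hr
        simp only [Function.comp]
        by_cases hreq : r = n % 5
        · subst hreq
          rw [if_pos (by simp)]
          congr 1
          rw [bktA_append_singleton, if_pos (by omega),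
            join_append_singleton _ (bktA_ne_nil cs 0 (n % 5) ⟨n % 5, by omega, by omega⟩)]
          rw [String.append_assoc]
        · rw [if_neg (by simp; intro h; exact hreq (by exact_mod_cast h))]
          congr 2
          rw [bktA_append_singleton, if_neg (by omega)]
          simp
      · dsimp only
        rw [hlen]
        by_cases h4 : n % 5 = 4
        · rw [h4]
          have : (n + 1) % 5 = 0 := by omega
          rw [this]; rfl
        · rw [if_neg (by simp; omega)]
          have : (n + 1) % 5 = n % 5 + 1 := by omega
          rw [this]
          push_cast; ring

theorem foldl_out (l : List (Int × String)) (s : String) :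
    l.foldl (fun t kv => t ++ kv.2 ++ "\n") s =
      s ++ PySem.Str.join "" (l.map (fun kv => kv.2 ++ "\n")) := by
  induction l generalizing s with
  | nil =>
    apply String.toList_injective
    simp [PySem.Str.join, PySem.Chars.join, List.intercalate]
  | cons x t ih =>
    rw [List.foldl_cons, ih, List.map_cons, join_nil_cons]
    simp [String.append_assoc]

theorem foldl_lines (g : Int → String) (l : List Int) (s : String) :
    l.foldl (fun out r => out ++ g r ++ "\n") s =
      s ++ PySem.Str.join "" (l.map (fun r => g r ++ "\n")) := by
  induction l generalizing s with
  | nil =>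
    apply String.toList_injective
    simp [PySem.Str.join, PySem.Chars.join, List.intercalate]
  | cons x t ih =>
    rw [List.foldl_cons, ih, List.map_cons, join_nil_cons]
    simp [String.append_assoc]

theorem foldl_filter_map {α β σ : Type} (p : α → Bool) (f : α → β) (g : σ → β → σ) :
    ∀ (l : List α) (s : σ),
      l.foldl (fun s x => if p x then g s (f x) else s) s = ((l.filter p).map f).foldl g s := by
  intro l
  induction l with
  | nil => intro s; rfl
  | cons x t ih =>
    intro s
    by_cases h : p x <;> simp [h, ih]

theorem spacing_eq (l : List Int) (s : String) :
    l.foldl (fun sp _ => sp ++ " ") s = s ++ String.ofList (List.replicate l.length ' ') := by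
  induction l generalizing s with
  | nil =>
    apply String.toList_injective; simp
  | cons x t ih =>
    rw [List.foldl_cons, ih, List.length_cons]
    apply String.toList_injective
    simp [List.replicate_succ]

theorem step1 (freq : List (String × Int)) :
    (PySem.Dict.ofList freq).keys.foldl
      (fun (s : PySem.Dict Int String × Int) i =>
        let v := (PySem.Dict.ofList freq).getD i 0
        if v ≠ 0 then
          let spacing := (PySem.List.pyRange 0 (3 - PySem.Str.len (PySem.Int.toStr v)) 1).foldl
              (fun sp _ => sp ++ " ") ""
          let td := if s.1.contains s.2 then
              s.1.insert s.2 (s.1.getD s.2 "" ++ ("    `**`" ++ PySem.Str.upper i ++ "`**`: " ++ PySem.Int.toStr v) ++ spacing)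
            else
              s.1.insert s.2 ("`**`" ++ PySem.Str.upper i ++ "`**`: " ++ PySem.Int.toStr v ++ spacing)
          let c := s.2 + 1
          (td, if c == 5 then 0 else c)
        else s)
      (PySem.Dict.empty, (0 : Int)) =
    ((((PySem.Dict.ofList freq).items.filter (fun kv => kv.2 != 0)).map
        (fun kv => pvCell kv.1 kv.2)).foldl stepC (PySem.Dict.empty, (0 : Int))) := by
  have hk : (PySem.Dict.ofList freq).keys = (PySem.Dict.ofList freq).items.map Prod.fst := rfl
  rw [hk, List.foldl_map,
    ← foldl_filter_map (fun kv : String × Int => kv.2 != 0) (fun kv => pvCell kv.1 kv.2) stepC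
      ((PySem.Dict.ofList freq).items) (PySem.Dict.empty, (0 : Int))]
  apply PySem.List.foldl_congr_mem
  intro acc kv hmem
  have hv : (PySem.Dict.ofList freq).getD kv.1 0 = kv.2 := by
    rcases kv with ⟨k, v⟩
    exact PySem.Dict.getD_of_mem_items _ hmem (PySem.Dict.nodup_keys_ofList freq) 0
  dsimp only
  rw [hv]
  by_cases h0 : kv.2 = 0
  · rw [if_neg (by simp [h0]), if_neg (by simp [h0])]
  · rw [if_pos h0]
    conv_rhs => rw [if_pos (show (kv.2 != 0) = true from by simp [h0])]
    have hsp : (PySem.List.pyRange 0 (3 - PySem.Str.len (PySem.Int.toStr kv.2)) 1).foldl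
        (fun sp _ => sp ++ " ") "" =
        String.ofList (PySem.List.pyRepeat [' '] (3 - PySem.Str.len (PySem.Int.toStr kv.2))) := by
      rw [spacing_eq, PySem.List.pyRepeat_singleton]
      have : (PySem.List.pyRange 0 (3 - PySem.Str.len (PySem.Int.toStr kv.2)) 1).length =
          (3 - PySem.Str.len (PySem.Int.toStr kv.2)).toNat := by
        have := PySem.List.length_pyRange_one 0 (3 - PySem.Str.len (PySem.Int.toStr kv.2))
        simpa using this
      rw [this]
      apply String.toList_injective
      simp
    rw [hsp]
    unfold stepC pvCell
    refine congrArg₂ Prod.mk ?_ rfl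
    by_cases hc : acc.1.contains acc.2
    · rw [if_pos hc, if_pos hc]
      congr 1
      simp only [String.append_assoc]
      rw [← String.append_assoc (s₁ := "    ") (s₂ := "`**`")]
      rfl
    · rw [if_neg hc, if_neg hc]

-- shifting the start index by a full period of 5 does not change a column
theorem bktA_shift (cs : List String) : ∀ (i r : Nat), bktA cs (i + 5) r = bktA cs i r := by
  induction cs with
  | nil => intro i r; rfl
  | cons x t ih =>
    intro i r
    simp only [bktA]
    rw [(show (i + 5) % 5 = i % 5 from by omega), (show i + 5 + 1 = (i + 1) + 5 from by omega), ih]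

-- a column of a short list (≤ 5 entries) is the single element at index r, if any
theorem bktA_short (a : List String) (h5 : a.length ≤ 5) (r : Nat) (hr : r < 5) :
    bktA a 0 r = if r < a.length then [a.getD r ""] else [] := by
  rcases a with _ | ⟨x0, _ | ⟨x1, _ | ⟨x2, _ | ⟨x3, _ | ⟨x4, t⟩⟩⟩⟩⟩
  · simp [bktA]
  · interval_cases r <;> simp [bktA]
  · interval_cases r <;> simp [bktA]
  · interval_cases r <;> simp [bktA]
  · interval_cases r <;> simp [bktA]
  · have ht : t = [] := by simp at h5; exact List.eq_nil_of_length_eq_zero (by omega)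
    subst ht
    interval_cases r <;> simp [bktA]

theorem bktA_append (a b : List String) : ∀ (i r : Nat),
    bktA (a ++ b) i r = bktA a i r ++ bktA b (i + a.length) r := by
  induction a with
  | nil => intro i r; simp [bktA]
  | cons x t ih =>
    intro i r
    simp only [List.cons_append, bktA, ih (i + 1) r, List.length_cons, List.append_assoc]
    rw [(show i + 1 + t.length = i + (t.length + 1) from by omega)]

-- column r of the row-of-five chunking is exactly the mod-5 column bktA
theorem chunkCol (cs : List String) (r : Nat) (hr : r < 5) :
    ((pvChunks cs).filter (fun row => decide (((r : Nat) : Int) < ((row.length : Int))))).map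
      (fun row => PySem.List.pyGetD row ((r : Nat) : Int) "") = bktA cs 0 r := by
  by_cases h : cs = []
  · subst h; simp [pvChunks, bktA]
  · rw [pvChunks, dif_neg h]
    have htake : PySem.List.slice cs none (some (5 : Int)) = cs.take 5 := by
      rw [PySem.List.slice_to cs (by norm_num)]; rfl
    have hdrop : PySem.List.slice cs (some (5 : Int)) none = cs.drop 5 := by
      rw [PySem.List.slice_from cs (by norm_num)]; rfl
    rw [htake, hdrop]
    have ih := chunkCol (cs.drop 5) r hr
    have hsplit : bktA cs 0 r = bktA (cs.take 5) 0 r ++ bktA (cs.drop 5) (0 + (cs.take 5).length) r := by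
      conv_lhs => rw [← List.take_append_drop 5 cs]
      exact bktA_append _ _ 0 r
    have hshift : bktA (cs.drop 5) (0 + (cs.take 5).length) r = bktA (cs.drop 5) 0 r := by
      rcases Nat.lt_or_ge cs.length 5 with hlt | hle
      · rw [(show cs.drop 5 = [] from List.drop_eq_nil_of_le (by omega))]; rfl
      · rw [(show (cs.take 5).length = 5 from by simp; omega)]
        exact bktA_shift _ 0 r
    rw [hsplit, hshift, ← ih]
    rw [List.filter_cons]
    by_cases hin : r < (cs.take 5).length
    · have hin' : r < min 5 cs.length := by simpa using hin
      rw [if_pos (by simp; omega), List.map_cons,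
        bktA_short (cs.take 5) (by simp) r hr, if_pos hin, PySem.List.pyGetD_natCast]
      rfl
    · have hin' : ¬ r < min 5 cs.length := by simpa using hin
      rw [if_neg (by simp; omega),
        bktA_short (cs.take 5) (by simp) r hr, if_neg hin, List.nil_append]
termination_by cs.length
decreasing_by
  have : cs.length ≠ 0 := by simpa [List.length_eq_zero_iff] using h
  simp [List.length_drop]; omega

-- ===== VERDICT (by name: the statement is the Claim_ definition above) =====
theorem disp_freq_spec : Claim_equal_disp_freq := by
  unfold Claim_equal_disp_freq Spec_disp_freq
  intro freq _
  unfold disp_freq disp_freq_alt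
  dsimp only
  rw [step1, coreA]
  rw [foldl_out]
  set cells := (((PySem.Dict.ofList freq).items.filter (fun kv => kv.2 != 0)).map
      (fun kv => pvCell kv.1 kv.2)) with hcells
  rw [foldl_lines]
  have hmin : min ((cells.length : Int)) 5 = ((min cells.length 5 : Nat) : Int) := by
    push_cast; rfl
  rw [hmin, PySem.List.pyRange_zero_natCast]
  simp only [List.map_map, List.map_map]
  congr 1
  congr 1
  apply List.map_congr_left
  intro r hrm
  simp only [List.mem_range] at hrm
  simp only [Function.comp]
  rw [chunkCol cells r (by omega)]
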